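-- pv_equiv track=rewrite | github.com/sirajhahmadnazeer123/Geeksforgeeks | Easy/Match specific pattern/match-specific-pattern.py | findSpecificPattern
-- ===== SOURCE A (Python) =====
-- def findSpecificPattern(Dict, pattern):
--     #Code here
--     p=[]
--     f=[]
--     c=[]
--     for i in Dict:
--         d=[]
--         for j in i:
--             d.append(i.index(j))
--         p.append(d)
--     for j in pattern:
--         f.append(pattern.index(j))
--     for i in range(len(p)):
--         if p[i]==f:
--             c.append(Dict[i])
--     return c
-- ===== SOURCE B (Python) =====
-- def _isomorphic(word, pattern):
--     fwd = {}
--     bwd = {}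
--     for wc, pc in zip(word, pattern):
--         if fwd.get(wc, pc) != pc or bwd.get(pc, wc) != wc:
--             return False
--         fwd[wc] = pc
--         bwd[pc] = wc
--     return True
--
--
-- def findSpecificPattern(Dict, pattern):
--     res = []
--     for word in Dict:
--         if len(word) == len(pattern) and _isomorphic(word, pattern):
--             res.append(word)
--     return res
-- ===== Notes on version B (the rewrite author's own statement) =====
-- stated objective: faster
-- what changed: Instead of canonicalizing every word and the pattern into first-occurrence-index signature lists (each built with a repeated linear .index scan) and comparing the lists, B checks each word directly for isomorphism with the pattern in one pass, maintaining a forward and a backward character-mapping dict and rejecting on the first inconsistent position.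
import Mathlib
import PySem

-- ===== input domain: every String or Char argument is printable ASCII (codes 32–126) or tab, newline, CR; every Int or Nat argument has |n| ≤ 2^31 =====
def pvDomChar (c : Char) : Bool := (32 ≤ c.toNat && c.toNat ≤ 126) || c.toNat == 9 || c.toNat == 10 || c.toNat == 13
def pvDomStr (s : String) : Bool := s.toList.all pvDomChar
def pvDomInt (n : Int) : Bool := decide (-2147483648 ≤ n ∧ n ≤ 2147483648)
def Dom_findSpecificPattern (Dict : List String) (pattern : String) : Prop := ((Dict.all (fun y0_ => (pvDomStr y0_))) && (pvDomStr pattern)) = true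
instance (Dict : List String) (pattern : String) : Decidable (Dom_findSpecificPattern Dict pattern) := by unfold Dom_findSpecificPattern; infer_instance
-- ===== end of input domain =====

-- B replaces A's "build first-occurrence-index signature of every word, then compare signatures"
-- with a single two-way-dictionary isomorphism scan per word (objective: faster per-word check).


-- ===== PORT A =====
-- 'd = []; for j in i: d.append(i.index(j))' — i.index(j) never raises here (j is drawn from i),
-- so the ValueError arm of PySem.List.index? is unreachable and .getD 0 is exact.
def pvSigLoop (s : List Char) : List Int :=
  s.foldl (fun d j => d ++ [(((PySem.List.index? s j).getD 0 : Nat) : Int)]) []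

def findSpecificPattern (Dict : List String) (pattern : String) : List String :=
  let p : List (List Int) := Dict.foldl (fun acc i => acc ++ [pvSigLoop i.toList]) []
  let f : List Int := pvSigLoop pattern.toList
  (PySem.List.pyRange 0 p.length 1).foldl
    (fun c i =>
      if PySem.List.pyGetD p i [] == f then c ++ [PySem.List.pyGetD Dict i ""] else c) []

-- ===== PORT B =====
-- 'for wc, pc in zip(word, pattern): …' with the two dicts; early 'return False' = the else-arm.
def pvIsoScan : List (Char × Char) → PySem.Dict Char Char → PySem.Dict Char Char → Bool
  | [], _, _ => true
  | (wc, pc) :: rest, fwd, bwd =>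
      if fwd.getD wc pc == pc && bwd.getD pc wc == wc then
        pvIsoScan rest (fwd.insert wc pc) (bwd.insert pc wc)
      else false

def findSpecificPattern_alt (Dict : List String) (pattern : String) : List String :=
  Dict.foldl
    (fun res word =>
      if PySem.Str.len word == PySem.Str.len pattern &&
          pvIsoScan (List.zip word.toList pattern.toList) PySem.Dict.empty PySem.Dict.empty then
        res ++ [word]
      else res) []

-- ===== PRECONDITION & SPEC =====
def Spec_findSpecificPattern (Dict : List String) (pattern : String) (out : List String) : Prop := out = findSpecificPattern_alt Dict pattern
instance (Dict : List String) (pattern : String) (out : List String) : Decidable (Spec_findSpecificPattern Dict pattern out) := by unfold Spec_findSpecificPattern; infer_instance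

-- ===== CLAIM (what is proved, stated in full; the proofs are below) =====
def Claim_equal_findSpecificPattern : Prop := ∀ (Dict : List String) (pattern : String), Dom_findSpecificPattern Dict pattern → Spec_findSpecificPattern Dict pattern (findSpecificPattern Dict pattern)

-- ===== LEMMAS AND PROOFS =====

-- first-occurrence index, as A computes it
def pvFst (s : List Char) (c : Char) : Nat := (PySem.List.index? s c).getD 0

-- "the equality patterns of the first n positions of w and of p agree"
def pvOk (w p : List Char) (n : Nat) : Prop :=
  ∀ j k, j < k → k < n → (w.getD j ' ' = w.getD k ' ' ↔ p.getD j ' ' = p.getD k ' ')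

def pvFwd (l : List (Char × Char)) : PySem.Dict Char Char :=
  l.foldl (fun d q => d.insert q.1 q.2) PySem.Dict.empty

theorem pvSigLoop_eq_map (s : List Char) :
    pvSigLoop s = s.map (fun j => ((pvFst s j : Nat) : Int)) := by
  rw [pvSigLoop, PySem.List.foldl_append_singleton_eq_map
    (f := fun j => (((PySem.List.index? s j).getD 0 : Nat) : Int))]
  rfl

theorem pvFst_spec {s : List Char} {c : Char} (h : c ∈ s) :
    ∃ hk : pvFst s c < s.length, s[pvFst s c] = c ∧ ∀ j (_ : j < pvFst s c), s.getD j ' ' ≠ c := by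
  have hs : (PySem.List.index? s c).isSome = true := (PySem.List.index?_isSome_iff s c).mpr h
  obtain ⟨k, hk⟩ := Option.isSome_iff_exists.mp hs
  obtain ⟨hlt, hget, hmin⟩ := PySem.List.getElem_of_index?_eq_some hk
  have hfst : pvFst s c = k := by rw [pvFst, hk]; rfl
  refine ⟨by rw [hfst]; exact hlt, by simp only [hfst]; exact hget, ?_⟩
  intro j hj
  rw [hfst] at hj
  have hjs : j < s.length := by omega
  rw [List.getD_eq_getElem s ' ' hjs]
  exact hmin j hj

theorem getD_pvFst {s : List Char} {c : Char} (h : c ∈ s) : s.getD (pvFst s c) ' ' = c := by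
  obtain ⟨hk, hget, -⟩ := pvFst_spec h
  rw [List.getD_eq_getElem s ' ' hk, hget]

theorem pvFst_le {s : List Char} {c : Char} {k : Nat} (hk : k < s.length)
    (hc : s.getD k ' ' = c) : pvFst s c ≤ k := by
  have hmem : c ∈ s := by
    rw [List.getD_eq_getElem s ' ' hk] at hc; exact hc ▸ s.getElem_mem hk
  by_contra hlt
  exact (pvFst_spec hmem).2.2 k (by omega) hc

theorem mem_getD {s : List Char} {k : Nat} (hk : k < s.length) : s.getD k ' ' ∈ s := by
  rw [List.getD_eq_getElem s ' ' hk]; exact s.getElem_mem hk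

-- ===== the A-side characterisation: equal signatures ⟺ equal equality-pattern =====

theorem sig_iff (w p : List Char) :
    pvSigLoop w = pvSigLoop p ↔ (w.length = p.length ∧ pvOk w p w.length) := by
  rw [pvSigLoop_eq_map, pvSigLoop_eq_map]
  constructor
  · intro hmap
    have hlen : w.length = p.length := by
      have := congrArg List.length hmap; simpa using this
    have hpt : ∀ k, k < w.length → pvFst w (w.getD k ' ') = pvFst p (p.getD k ' ') := by
      intro k hk
      have hk' : k < p.length := by omega
      have h1 : (w.map (fun j => ((pvFst w j : Nat) : Int))).getD k 0
          = (p.map (fun j => ((pvFst p j : Nat) : Int))).getD k 0 := by rw [hmap]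
      rw [List.getD_eq_getElem _ 0 (by simpa using hk),
          List.getD_eq_getElem _ 0 (by simpa using hk')] at h1
      simp only [List.getElem_map] at h1
      have h2 : pvFst w w[k] = pvFst p p[k] := by exact_mod_cast h1
      rwa [List.getD_eq_getElem w ' ' hk, List.getD_eq_getElem p ' ' hk']
    refine ⟨hlen, ?_⟩
    intro j k hjk hk
    have hj : j < w.length := by omega
    have hjp : j < p.length := by omega
    have hkp : k < p.length := by omega
    constructor
    · intro hw
      have heq : pvFst p (p.getD j ' ') = pvFst p (p.getD k ' ') := by
        rw [← hpt j hj, ← hpt k hk, hw]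
      calc p.getD j ' ' = p.getD (pvFst p (p.getD j ' ')) ' ' := (getD_pvFst (mem_getD hjp)).symm
        _ = p.getD (pvFst p (p.getD k ' ')) ' ' := by rw [heq]
        _ = p.getD k ' ' := getD_pvFst (mem_getD hkp)
    · intro hp
      have heq : pvFst w (w.getD j ' ') = pvFst w (w.getD k ' ') := by
        rw [hpt j hj, hpt k hk, hp]
      calc w.getD j ' ' = w.getD (pvFst w (w.getD j ' ')) ' ' := (getD_pvFst (mem_getD hj)).symm
        _ = w.getD (pvFst w (w.getD k ' ')) ' ' := by rw [heq]
        _ = w.getD k ' ' := getD_pvFst (mem_getD hk)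
  · rintro ⟨hlen, hok⟩
    apply List.ext_getElem (by simpa using hlen)
    intro k hk1 hk2
    have hkw : k < w.length := by simpa using hk1
    have hkp : k < p.length := by simpa using hk2
    simp only [List.getElem_map]
    have hwk : w.getD k ' ' = w[k] := List.getD_eq_getElem w ' ' hkw
    have hpk : p.getD k ' ' = p[k] := List.getD_eq_getElem p ' ' hkp
    have hwmem : w[k] ∈ w := w.getElem_mem hkw
    have hpmem : p[k] ∈ p := p.getElem_mem hkp
    have hik : pvFst w w[k] ≤ k := pvFst_le hkw hwk
    have hik' : pvFst p p[k] ≤ k := pvFst_le hkp hpk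
    have hiw : w.getD (pvFst w w[k]) ' ' = w[k] := getD_pvFst hwmem
    have hip : p.getD (pvFst p p[k]) ' ' = p[k] := getD_pvFst hpmem
    have hpi : p.getD (pvFst w w[k]) ' ' = p[k] := by
      rcases Nat.lt_or_ge (pvFst w w[k]) k with h | h
      · have := (hok _ k h hkw).mp (by rw [hiw, hwk])
        rwa [hpk] at this
      · have hkk : pvFst w w[k] = k := by omega
        rw [hkk, hpk]
    have hwi' : w.getD (pvFst p p[k]) ' ' = w[k] := by
      rcases Nat.lt_or_ge (pvFst p p[k]) k with h | h
      · have := (hok _ k h hkw).mpr (by rw [hip, hpk])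
        rwa [hwk] at this
      · have hkk : pvFst p p[k] = k := by omega
        rw [hkk, hwk]
    have h1 : pvFst p p[k] ≤ pvFst w w[k] := pvFst_le (by omega) hpi
    have h2 : pvFst w w[k] ≤ pvFst p p[k] := pvFst_le (by omega) hwi'
    have : pvFst w w[k] = pvFst p p[k] := by omega
    rw [this]

-- ===== dictionary lookup after a loop of inserts =====

theorem foldl_ins_getD_of_absent (l : List (Char × Char)) (d : PySem.Dict Char Char)
    (c dflt : Char) (h : ∀ q ∈ l, q.1 ≠ c) :
    (l.foldl (fun d q => d.insert q.1 q.2) d).getD c dflt = d.getD c dflt := by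
  induction l generalizing d with
  | nil => rfl
  | cons q t ih =>
    rw [List.foldl_cons, ih _ (fun q hq => h q (List.mem_cons_of_mem _ hq)),
      PySem.Dict.getD_insert]
    rw [if_neg]
    exact fun hc => h q (List.mem_cons_self) (by rw [hc])

theorem foldl_ins_getD_of_present (l : List (Char × Char)) (d : PySem.Dict Char Char)
    (c v dflt : Char) (hmem : ∃ q ∈ l, q.1 = c) (hval : ∀ q ∈ l, q.1 = c → q.2 = v) :
    (l.foldl (fun d q => d.insert q.1 q.2) d).getD c dflt = v := by
  induction l generalizing d with
  | nil => obtain ⟨q, hq, -⟩ := hmem; exact absurd hq (List.not_mem_nil)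
  | cons q t ih =>
    rw [List.foldl_cons]
    by_cases ht : ∃ q' ∈ t, q'.1 = c
    · exact ih _ ht (fun q' hq' => hval q' (List.mem_cons_of_mem _ hq'))
    · push Not at ht
      have hq1 : q.1 = c := by
        obtain ⟨q', hq', hc⟩ := hmem
        rcases List.mem_cons.mp hq' with h | h
        · rw [← h]; exact hc
        · exact absurd hc (ht q' h)
      rw [foldl_ins_getD_of_absent _ _ _ _ ht, PySem.Dict.getD_insert, hq1, if_pos rfl]
      exact hval q List.mem_cons_self hq1

theorem mem_zip_iff {u a : List Char} (hl : u.length = a.length) (q : Char × Char) :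
    q ∈ u.zip a ↔ ∃ i, ∃ h1 : i < u.length, u[i] = q.1 ∧ a[i]'(by omega) = q.2 := by
  constructor
  · intro h
    rw [List.mem_iff_getElem] at h
    obtain ⟨i, hi, he⟩ := h
    have hi' : i < u.length := by rw [List.length_zip] at hi; omega
    refine ⟨i, hi', ?_, ?_⟩ <;> rw [← he] <;> simp [List.getElem_zip]
  · rintro ⟨i, h1, hu, ha⟩
    rw [List.mem_iff_getElem]
    refine ⟨i, by rw [List.length_zip]; omega, ?_⟩
    rw [List.getElem_zip]
    ext <;> simp [hu, ha]

-- ===== one step of the two-dictionary scan, under a consistent processed prefix =====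

theorem step_iff (u a : List Char) (hl : u.length = a.length)
    (hOk : ∀ j k, j < k → k < u.length → (u.getD j ' ' = u.getD k ' ' ↔ a.getD j ' ' = a.getD k ' '))
    (wc pc : Char) :
    (((pvFwd (u.zip a)).getD wc pc == pc) && ((pvFwd (a.zip u)).getD pc wc == wc)) = true
      ↔ ∀ j, j < u.length → (u.getD j ' ' = wc ↔ a.getD j ' ' = pc) := by
  have hOk' : ∀ j k, j < u.length → k < u.length → u.getD j ' ' = u.getD k ' ' →
      a.getD j ' ' = a.getD k ' ' := by
    intro j k hj hk he
    rcases Nat.lt_trichotomy j k with h | h | h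
    · exact (hOk j k h hk).mp he
    · rw [h]
    · exact ((hOk k j h hj).mp he.symm).symm
  have hOk'' : ∀ j k, j < u.length → k < u.length → a.getD j ' ' = a.getD k ' ' →
      u.getD j ' ' = u.getD k ' ' := by
    intro j k hj hk he
    rcases Nat.lt_trichotomy j k with h | h | h
    · exact (hOk j k h hk).mpr he
    · rw [h]
    · exact ((hOk k j h hj).mpr he.symm).symm
  rw [Bool.and_eq_true, beq_iff_eq, beq_iff_eq]
  constructor
  · rintro ⟨h1, h2⟩ j hj
    have hja : j < a.length := by omega
    constructor
    · intro huj
      have hmem : ∃ q ∈ u.zip a, q.1 = wc :=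
        ⟨(u[j], a[j]'hja), (mem_zip_iff hl _).mpr ⟨j, hj, rfl, rfl⟩,
          by rw [← List.getD_eq_getElem u ' ' hj]; exact huj⟩
      have hval : ∀ q ∈ u.zip a, q.1 = wc → q.2 = a.getD j ' ' := by
        rintro q hq hqc
        obtain ⟨i, hi, hui, hai⟩ := (mem_zip_iff hl q).mp hq
        have : u.getD i ' ' = u.getD j ' ' := by
          rw [List.getD_eq_getElem u ' ' hi, hui, hqc, huj]
        rw [← hai, ← List.getD_eq_getElem a ' ' (by omega : i < a.length)]
        exact hOk' i j hi hj this
      rw [pvFwd, foldl_ins_getD_of_present _ _ _ _ _ hmem hval] at h1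
      rw [← h1]
    · intro haj
      have hmem : ∃ q ∈ a.zip u, q.1 = pc :=
        ⟨(a[j]'hja, u[j]), (mem_zip_iff hl.symm _).mpr ⟨j, hja, rfl, rfl⟩,
          by rw [← List.getD_eq_getElem a ' ' hja]; exact haj⟩
      have hval : ∀ q ∈ a.zip u, q.1 = pc → q.2 = u.getD j ' ' := by
        rintro q hq hqc
        obtain ⟨i, hi, hai, hui⟩ := (mem_zip_iff hl.symm q).mp hq
        have : a.getD i ' ' = a.getD j ' ' := by
          rw [List.getD_eq_getElem a ' ' hi, hai, hqc, haj]
        rw [← hui, ← List.getD_eq_getElem u ' ' (by omega : i < u.length)]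
        exact hOk'' i j (by omega) hj this
      rw [pvFwd, foldl_ins_getD_of_present _ _ _ _ _ hmem hval] at h2
      rw [← h2]
  · intro hiff
    by_cases hw : ∃ j, ∃ _ : j < u.length, u.getD j ' ' = wc
    · obtain ⟨j0, hj0, hu0⟩ := hw
      have ha0 : a.getD j0 ' ' = pc := (hiff j0 hj0).mp hu0
      constructor
      · rw [pvFwd, foldl_ins_getD_of_present _ _ _ _ pc
          ⟨(u[j0], a[j0]'(by omega)), (mem_zip_iff hl _).mpr ⟨j0, hj0, rfl, rfl⟩,
            by rw [← List.getD_eq_getElem u ' ' hj0]; exact hu0⟩ ?_]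
        rintro q hq hqc
        obtain ⟨i, hi, hui, hai⟩ := (mem_zip_iff hl q).mp hq
        rw [← hai, ← List.getD_eq_getElem a ' ' (by omega : i < a.length)]
        refine (hiff i hi).mp ?_
        rw [List.getD_eq_getElem u ' ' hi, hui, hqc]
      · rw [pvFwd, foldl_ins_getD_of_present _ _ _ _ wc
          ⟨(a[j0]'(by omega), u[j0]), (mem_zip_iff hl.symm _).mpr ⟨j0, by omega, rfl, rfl⟩,
            by rw [← List.getD_eq_getElem a ' ' (by omega : j0 < a.length)]; exact ha0⟩ ?_]
        rintro q hq hqc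
        obtain ⟨i, hi, hai, hui⟩ := (mem_zip_iff hl.symm q).mp hq
        rw [← hui, ← List.getD_eq_getElem u ' ' (by omega : i < u.length)]
        refine (hiff i (by omega)).mpr ?_
        rw [List.getD_eq_getElem a ' ' hi, hai, hqc]
    · push Not at hw
      have hpabs : ∀ j, ∀ _ : j < a.length, a.getD j ' ' ≠ pc := by
        intro j hj hc
        exact hw j (by omega) ((hiff j (by omega)).mpr hc)
      constructor
      · rw [pvFwd, foldl_ins_getD_of_absent]
        · rfl
        · rintro q hq hqc
          obtain ⟨i, hi, hui, -⟩ := (mem_zip_iff hl q).mp hq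
          exact hw i hi (by rw [List.getD_eq_getElem u ' ' hi, hui, hqc])
      · rw [pvFwd, foldl_ins_getD_of_absent]
        · rfl
        · rintro q hq hqc
          obtain ⟨i, hi, hai, -⟩ := (mem_zip_iff hl.symm q).mp hq
          exact hpabs i hi (by rw [List.getD_eq_getElem a ' ' hi, hai, hqc])

-- ===== bookkeeping for the prefix induction =====

theorem getD_append_lt (u t : List Char) (j : Nat) (h : j < u.length) :
    (u ++ t).getD j ' ' = u.getD j ' ' := by
  simp [List.getD, List.getElem?_append_left h]

theorem getD_append_head (u t : List Char) (c : Char) :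
    (u ++ c :: t).getD u.length ' ' = c := by
  simp [List.getD]

theorem pvOk_mono {W P : List Char} {m n : Nat} (h : m ≤ n) (hok : pvOk W P n) :
    pvOk W P m := fun j k hjk hk => hok j k hjk (by omega)

theorem pvOk_succ (W P : List Char) (n : Nat) :
    pvOk W P (n + 1) ↔ pvOk W P n ∧
      ∀ j, j < n → (W.getD j ' ' = W.getD n ' ' ↔ P.getD j ' ' = P.getD n ' ') := by
  constructor
  · exact fun h => ⟨pvOk_mono (by omega) h, fun j hj => h j n hj (by omega)⟩
  · rintro ⟨h1, h2⟩ j k hjk hk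
    rcases Nat.lt_or_ge k n with h | h
    · exact h1 j k hjk h
    · have : k = n := by omega
      subst this
      exact h2 j hjk

theorem pvFwd_snoc (u a : List Char) (hl : u.length = a.length) (x y : Char) :
    pvFwd ((u ++ [x]).zip (a ++ [y])) = (pvFwd (u.zip a)).insert x y := by
  rw [List.zip_append hl]
  show pvFwd (u.zip a ++ [(x, y)]) = _
  rw [pvFwd, List.foldl_append]
  rfl

-- ===== the B-side characterisation: the scan accepts ⟺ equal equality-pattern =====

theorem scan_main : ∀ (w p u a : List Char), w.length = p.length → u.length = a.length →
    pvOk (u ++ w) (a ++ p) u.length →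
    (pvIsoScan (w.zip p) (pvFwd (u.zip a)) (pvFwd (a.zip u)) = true
      ↔ pvOk (u ++ w) (a ++ p) (u.length + w.length)) := by
  intro w
  induction w with
  | nil =>
    intro p u a hlp hlu hOk
    have hp : p = [] := by
      have := hlp.symm; simpa [List.length_eq_zero_iff] using this
    subst hp
    simpa [pvIsoScan] using hOk
  | cons wc w' ih =>
    intro p u a hlp hlu hOk
    cases p with
    | nil => simp at hlp
    | cons pc p' =>
      have hlp' : w'.length = p'.length := by simpa using hlp
      rw [List.zip_cons_cons]
      show (if ((pvFwd (u.zip a)).getD wc pc == pc) && ((pvFwd (a.zip u)).getD pc wc == wc) then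
          pvIsoScan (w'.zip p') ((pvFwd (u.zip a)).insert wc pc) ((pvFwd (a.zip u)).insert pc wc)
        else false) = true ↔ _
      have hOkua : ∀ j k, j < k → k < u.length →
          (u.getD j ' ' = u.getD k ' ' ↔ a.getD j ' ' = a.getD k ' ') := by
        intro j k hjk hk
        have := hOk j k hjk hk
        rwa [getD_append_lt _ _ j (by omega), getD_append_lt _ _ k hk,
          getD_append_lt _ _ j (by omega), getD_append_lt _ _ k (by omega)] at this
      have hstep := step_iff u a hlu hOkua wc pc
      -- the step condition, phrased on the full strings
      have hbridge : (∀ j, j < u.length → (u.getD j ' ' = wc ↔ a.getD j ' ' = pc)) ↔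
          pvOk (u ++ wc :: w') (a ++ pc :: p') (u.length + 1) := by
        rw [pvOk_succ]
        constructor
        · intro h
          refine ⟨hOk, fun j hj => ?_⟩
          rw [getD_append_lt _ _ j hj, getD_append_head,
            getD_append_lt _ _ j (by omega), hlu, getD_append_head]
          exact h j hj
        · rintro ⟨-, h⟩ j hj
          have := h j hj
          rwa [getD_append_lt _ _ j hj, getD_append_head,
            getD_append_lt _ _ j (by omega), hlu, getD_append_head] at this
      by_cases hC : (((pvFwd (u.zip a)).getD wc pc == pc) &&
          ((pvFwd (a.zip u)).getD pc wc == wc)) = true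
      · rw [if_pos hC]
        have hOk1 : pvOk (u ++ wc :: w') (a ++ pc :: p') (u.length + 1) :=
          hbridge.mp (hstep.mp hC)
        have hrw1 : (pvFwd (u.zip a)).insert wc pc = pvFwd ((u ++ [wc]).zip (a ++ [pc])) :=
          (pvFwd_snoc u a hlu wc pc).symm
        have hrw2 : (pvFwd (a.zip u)).insert pc wc = pvFwd ((a ++ [pc]).zip (u ++ [wc])) :=
          (pvFwd_snoc a u hlu.symm pc wc).symm
        rw [hrw1, hrw2]
        have hOk1' : pvOk ((u ++ [wc]) ++ w') ((a ++ [pc]) ++ p') (u ++ [wc]).length := by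
          simpa using hOk1
        have hih := ih p' (u ++ [wc]) (a ++ [pc]) hlp' (by simp [hlu]) hOk1'
        have harith : u.length + (wc :: w').length = (u ++ [wc]).length + w'.length := by
          simp only [List.length_cons, List.length_append, List.length_nil]
          omega
        rw [harith, List.append_cons u wc w', List.append_cons a pc p']
        exact hih
      · rw [if_neg hC]
        simp only [Bool.false_eq_true, false_iff]
        intro hOkAll
        have h1 : pvOk (u ++ wc :: w') (a ++ pc :: p') (u.length + 1) :=
          pvOk_mono (by simp) hOkAll
        exact hC (hstep.mpr (hbridge.mpr h1))

theorem scan_top (w p : List Char) (hl : w.length = p.length) :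
    pvIsoScan (w.zip p) PySem.Dict.empty PySem.Dict.empty = true ↔ pvOk w p w.length := by
  have := scan_main w p [] [] hl rfl (by intro j k hjk hk; simp at hk)
  simpa [pvFwd] using this

-- ===== reducing the two ports to filters over Dict =====

theorem A_filter (D : List String) (pat : String) :
    findSpecificPattern D pat
      = D.filter (fun w => pvSigLoop w.toList == pvSigLoop pat.toList) := by
  rw [findSpecificPattern]
  rw [PySem.List.foldl_append_singleton_eq_map (f := fun (i : String) => pvSigLoop i.toList)]
  simp only [List.nil_append]
  have hbody : ∀ (c : List String) (i : Int),
      (if PySem.List.pyGetD (D.map (fun i => pvSigLoop i.toList)) i [] == pvSigLoop pat.toList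
        then c ++ [PySem.List.pyGetD D i ""] else c)
      = (if pvSigLoop (PySem.List.pyGetD D i "").toList == pvSigLoop pat.toList
        then c ++ [PySem.List.pyGetD D i ""] else c) := by
    intro c i
    rw [show ([] : List Int) = (fun (i : String) => pvSigLoop i.toList) "" from rfl,
      PySem.List.pyGetD_map (fun (i : String) => pvSigLoop i.toList) D i ""]
  simp only [List.length_map]
  refine Eq.trans (PySem.List.foldl_congr_mem _ _
    (fun (c : List String) (i : Int) =>
      if pvSigLoop (PySem.List.pyGetD D i "").toList == pvSigLoop pat.toList
      then c ++ [PySem.List.pyGetD D i ""] else c)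
    _ (fun acc x _ => hbody acc x)) ?_
  rw [PySem.List.foldl_pyRange_zero_pyGetD' D ""
    (fun c x => if pvSigLoop x.toList == pvSigLoop pat.toList then c ++ [x] else c) []]
  exact (PySem.List.foldl_append_if_eq_filter
    (fun w => pvSigLoop w.toList == pvSigLoop pat.toList) D []).trans (List.nil_append _)

theorem B_filter (D : List String) (pat : String) :
    findSpecificPattern_alt D pat
      = D.filter (fun w => (PySem.Str.len w == PySem.Str.len pat) &&
          pvIsoScan (List.zip w.toList pat.toList) PySem.Dict.empty PySem.Dict.empty) := by
  rw [findSpecificPattern_alt]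
  exact (PySem.List.foldl_append_if_eq_filter
    (fun w => (PySem.Str.len w == PySem.Str.len pat) &&
      pvIsoScan (List.zip w.toList pat.toList) PySem.Dict.empty PySem.Dict.empty)
    D []).trans (List.nil_append _)

-- the two per-word tests agree
theorem pred_eq (pat w : String) :
    (pvSigLoop w.toList == pvSigLoop pat.toList)
      = ((PySem.Str.len w == PySem.Str.len pat) &&
          pvIsoScan (List.zip w.toList pat.toList) PySem.Dict.empty PySem.Dict.empty) := by
  rw [Bool.eq_iff_iff, beq_iff_eq, Bool.and_eq_true, beq_iff_eq, sig_iff,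
    PySem.Str.len_eq, PySem.Str.len_eq, Int.natCast_inj]
  constructor
  · rintro ⟨hl, hok⟩
    exact ⟨hl, (scan_top _ _ hl).mpr hok⟩
  · rintro ⟨hl, hs⟩
    exact ⟨hl, (scan_top _ _ hl).mp hs⟩

-- ===== VERDICT (by name: the statement is the Claim_ definition above) =====
theorem findSpecificPattern_spec : Claim_equal_findSpecificPattern := by
  intro D pat _
  show findSpecificPattern D pat = findSpecificPattern_alt D pat
  rw [A_filter, B_filter]
  exact List.filter_congr (fun w _ => pred_eq pat w)
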